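-- pv_equiv track=rewrite | github.com/cdjasonj/datagrand | inputs/data_process.py | get_bichar
-- ===== SOURCE A (Python) =====
-- def get_bichar(text):
--     """
--     w1,w2,w3,w4,w5,w6,w7
--     bichar : w1w2,w2w3,w4w5,w5w6,w7w0
--     :param text:
--     :return:
--     """
--     new_text = []
--     for index, char in enumerate(text):
--         if index != len(text) - 1:  # 没有达到最后一个
--             new_text.append('_'.join([char,text[index + 1]]))
--         else:
--             new_text.append('_'.join([char, '$']))
--     return new_text
-- ===== SOURCE B (Python) =====
-- def get_bichar(text):
--     shifted = list(text[1:]) + ['$']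
--     return ['_'.join([a, b]) for a, b in zip(text, shifted)]
-- ===== Notes on version B (the rewrite author's own statement) =====
-- stated objective: idiomatic
-- what changed: Replaced the indexed loop with a last-index branch by a single zip over the text and its sentinel-extended shifted copy, eliminating the conditional and indexing.
import Mathlib
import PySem

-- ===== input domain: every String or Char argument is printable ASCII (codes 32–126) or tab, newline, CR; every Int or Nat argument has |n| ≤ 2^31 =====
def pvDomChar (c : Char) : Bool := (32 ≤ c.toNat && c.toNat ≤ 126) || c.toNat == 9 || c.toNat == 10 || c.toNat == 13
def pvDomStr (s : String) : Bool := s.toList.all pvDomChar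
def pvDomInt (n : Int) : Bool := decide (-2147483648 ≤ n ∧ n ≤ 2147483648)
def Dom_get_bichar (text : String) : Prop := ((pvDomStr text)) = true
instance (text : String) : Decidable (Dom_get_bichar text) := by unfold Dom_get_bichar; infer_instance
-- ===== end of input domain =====

-- B replaces A's indexed loop and last-index branch by one zip over the text and its
-- sentinel-extended shifted copy (more idiomatic; same cost).


-- ===== PORT A =====
-- for index, char in enumerate(text): append '_'.join([char, text[index+1]]) or '_'.join([char, '$'])
-- text[index+1] is ported with pyGetD; the default is never read, since in that branch index+1 < len(text).
def get_bichar (text : String) : List String :=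
  (PySem.List.enumerate text.toList).foldl (fun acc p =>
    if p.1 ≠ (PySem.Str.len text) - 1 then
      acc ++ [PySem.Str.join "_" [String.ofList [p.2], String.ofList [PySem.List.pyGetD text.toList (p.1 + 1) '$']]]
    else
      acc ++ [PySem.Str.join "_" [String.ofList [p.2], "$"]]) []

-- ===== PORT B =====
-- shifted = list(text[1:]) + ['$']; ['_'.join([a, b]) for a, b in zip(text, shifted)]
def get_bichar_alt (text : String) : List String :=
  let shifted : List Char := (PySem.Str.slice text (some 1) none).toList ++ ['$']
  (text.toList.zip shifted).map (fun p => PySem.Str.join "_" [String.ofList [p.1], String.ofList [p.2]])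

-- ===== PRECONDITION & SPEC =====
def Spec_get_bichar (text : String) (out : List String) : Prop := out = get_bichar_alt text
instance (text : String) (out : List String) : Decidable (Spec_get_bichar text out) := by unfold Spec_get_bichar; infer_instance

-- ===== CLAIM (what is proved, stated in full; the proofs are below) =====
def Claim_equal_get_bichar : Prop := ∀ (text : String), Dom_get_bichar text → Spec_get_bichar text (get_bichar text)

-- ===== LEMMAS AND PROOFS =====

theorem get_bichar_core (l : List Char) :
    (PySem.List.enumerate l).foldl (fun acc p =>
      if p.1 ≠ (l.length : Int) - 1 then
        acc ++ [PySem.Str.join "_" [String.ofList [p.2], String.ofList [PySem.List.pyGetD l (p.1 + 1) '$']]]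
      else
        acc ++ [PySem.Str.join "_" [String.ofList [p.2], "$"]]) []
    = (l.zip (l.drop 1 ++ ['$'])).map (fun p => PySem.Str.join "_" [String.ofList [p.1], String.ofList [p.2]]) := by
  have hf : (fun (acc : List String) (p : Int × Char) =>
      if p.1 ≠ (l.length : Int) - 1 then
        acc ++ [PySem.Str.join "_" [String.ofList [p.2], String.ofList [PySem.List.pyGetD l (p.1 + 1) '$']]]
      else
        acc ++ [PySem.Str.join "_" [String.ofList [p.2], "$"]])
    = (fun acc p => acc ++ [if p.1 ≠ (l.length : Int) - 1 then
        PySem.Str.join "_" [String.ofList [p.2], String.ofList [PySem.List.pyGetD l (p.1 + 1) '$']]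
      else
        PySem.Str.join "_" [String.ofList [p.2], "$"]]) := by
    funext acc p; split_ifs <;> rfl
  rw [hf, PySem.List.foldl_append_singleton_eq_map]
  apply List.ext_getElem
  · simp [PySem.List.length_enumerate]
    omega
  · intro k hk1 hk2
    simp only [List.nil_append, List.getElem_map, PySem.List.getElem_enumerate, List.getElem_zip]
    have hkl : k < l.length := by
      simpa [PySem.List.length_enumerate] using hk1
    by_cases h : k = l.length - 1
    · -- last index: the sentinel branch
      have hne : ¬ ((0 : Int) + k ≠ (l.length : Int) - 1) := by push Not; omega
      rw [if_neg hne]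
      have hdrop : (List.drop 1 l).length ≤ k := by simp; omega
      rw [List.getElem_append_right hdrop]
      simp
    · have hne : ((0 : Int) + k ≠ (l.length : Int) - 1) := by omega
      rw [if_pos hne]
      have hk1' : k + 1 < l.length := by omega
      have hlt : k < (List.drop 1 l).length := by simp; omega
      have hget : PySem.List.pyGetD l ((0 : Int) + k + 1) '$' = l[k + 1] := by
        have hc := PySem.List.pyGetD_natCast l (k + 1) '$'
        rw [show ((0 : Int) + k + 1) = ((k + 1 : Nat) : Int) by push_cast; ring, hc]
        simp [List.getD, hk1']
      rw [hget, List.getElem_append_left hlt, List.getElem_drop]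
      simp only [Nat.add_comm 1 k]

-- ===== VERDICT (by name: the statement is the Claim_ definition above) =====
theorem get_bichar_spec : Claim_equal_get_bichar := by
  intro text _
  unfold Spec_get_bichar get_bichar get_bichar_alt
  have hs : (PySem.Str.slice text (some 1) none).toList = text.toList.drop 1 := by
    simp [PySem.Str.toList_slice, PySem.Chars.slice_eq_listSlice, PySem.List.slice_from]
  simp only [hs, PySem.Str.len_eq]
  exact get_bichar_core text.toList
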